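-- pv_equiv track=rewrite | github.com/JonathanShabtai/coding_problems | misc/old_challenged/cracking1_2.py | is_perm_hash
-- ===== SOURCE A (Python) =====
-- def is_perm_hash(string1, string2):
--     checker_dict = {}
--     for char in string1:
--         if char in checker_dict.keys():
--             checker_dict[char] += 1
--         else:
--             checker_dict[char] = 1
--
--     for char in string2:
--         if char in checker_dict.keys():
--             checker_dict[char] -= 1
--         else:
--             return False
--
--     return True
-- ===== SOURCE B (Python) =====
-- def is_perm_hash(string1, string2):
--     mask1 = 0
--     for char in string1:
--         mask1 |= 1 << ord(char)
--     mask2 = 0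
--     for char in string2:
--         mask2 |= 1 << ord(char)
--     return mask1 | mask2 == mask1
-- ===== Notes on version B (the rewrite author's own statement) =====
-- stated objective: alternative
-- what changed: A's counting dict is dead code (counts never affect the result); B folds each string into a single presence bitmask (1 << ord(c) OR-ed in) and decides the answer with one integer containment test mask1 | mask2 == mask1, with no dictionary and no per-character membership lookup.
import Mathlib
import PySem

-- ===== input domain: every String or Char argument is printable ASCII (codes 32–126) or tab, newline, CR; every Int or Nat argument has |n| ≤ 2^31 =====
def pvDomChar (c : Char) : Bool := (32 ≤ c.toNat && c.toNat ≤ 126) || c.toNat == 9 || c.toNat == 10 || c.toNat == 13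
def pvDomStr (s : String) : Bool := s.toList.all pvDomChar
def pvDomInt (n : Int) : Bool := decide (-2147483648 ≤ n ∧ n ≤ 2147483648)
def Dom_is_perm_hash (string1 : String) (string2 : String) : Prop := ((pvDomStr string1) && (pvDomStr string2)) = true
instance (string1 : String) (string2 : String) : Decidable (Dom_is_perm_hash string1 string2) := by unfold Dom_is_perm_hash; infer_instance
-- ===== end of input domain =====

-- B drops A's dead-code counting dict and decides the answer by folding each string into one
-- presence bitmask and testing integer containment mask1 | mask2 == mask1 (alternative, same cost).

-- ===== PORT A =====
-- second loop of A: walk string2, decrement on hit, return False on a missing key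
def isPermLoop2 (d : PySem.Dict Char Int) : List Char → Bool
  | [] => true
  | c :: rest =>
    if d.contains c then isPermLoop2 (d.modify c 0 (· - 1)) rest
    else false

def is_perm_hash (string1 : String) (string2 : String) : Bool :=
  let checker_dict : PySem.Dict Char Int :=
    string1.toList.foldl
      (fun d char => if d.contains char then d.modify char 0 (· + 1) else d.insert char 1)
      PySem.Dict.empty
  isPermLoop2 checker_dict string2.toList

-- ===== PORT B =====
def is_perm_hash_alt (string1 : String) (string2 : String) : Bool :=
  let mask1 : Nat := string1.toList.foldl (fun m char => m ||| (1 <<< char.toNat)) 0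
  let mask2 : Nat := string2.toList.foldl (fun m char => m ||| (1 <<< char.toNat)) 0
  mask1 ||| mask2 == mask1

-- ===== PRECONDITION & SPEC =====
def Spec_is_perm_hash (string1 : String) (string2 : String) (out : Bool) : Prop := out = is_perm_hash_alt string1 string2
instance (string1 : String) (string2 : String) (out : Bool) : Decidable (Spec_is_perm_hash string1 string2 out) := by unfold Spec_is_perm_hash; infer_instance

-- ===== CLAIM (what is proved, stated in full; the proofs are below) =====
def Claim_equal_is_perm_hash : Prop := ∀ (string1 : String) (string2 : String), Dom_is_perm_hash string1 string2 → Spec_is_perm_hash string1 string2 (is_perm_hash string1 string2)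

-- ===== LEMMAS AND PROOFS =====

-- membership in the checker dict = membership in the scanned prefix of string1
lemma contains_foldl_checker (l : List Char) (d : PySem.Dict Char Int) (x : Char) :
    (l.foldl (fun d char => if d.contains char then d.modify char 0 (· + 1) else d.insert char 1) d).contains x
      = (d.contains x || l.contains x) := by
  induction l generalizing d with
  | nil => simp
  | cons c rest ih =>
    simp only [List.foldl_cons, ih]
    by_cases h : d.contains c = true
    · simp only [h, if_true, PySem.Dict.contains_modify]
      by_cases hx : x = c
      · simp [hx, h]
      · simp [beq_false_of_ne hx, hx]
    · simp only [h, if_false, Bool.false_eq_true, PySem.Dict.contains_insert]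
      by_cases hx : x = c
      · simp [hx, h]
      · simp [beq_false_of_ne hx, hx]

-- the second loop only tests key membership (modify never changes the key set)
lemma isPermLoop2_eq_all (l : List Char) (d : PySem.Dict Char Int) :
    isPermLoop2 d l = l.all d.contains := by
  induction l generalizing d with
  | nil => rfl
  | cons c rest ih =>
    by_cases h : d.contains c = true
    · have hc : (d.modify c 0 (· - 1)).contains = d.contains := by
        funext x
        rw [PySem.Dict.contains_modify]
        by_cases hx : x = c
        · simp [hx, h]
        · simp [beq_false_of_ne hx]
      simp [isPermLoop2, h, ih, hc]
    · simp [isPermLoop2, h]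

-- bit i of the folded mask is set iff it was already set or some scanned char has code i
lemma testBit_maskFold (l : List Char) (m i : Nat) :
    (l.foldl (fun m char => m ||| (1 <<< char.toNat)) m).testBit i
      = (m.testBit i || l.any (fun c => c.toNat == i)) := by
  induction l generalizing m with
  | nil => simp
  | cons c rest ih =>
    simp only [List.foldl_cons, ih, List.any_cons, Nat.testBit_or]
    have : (1 <<< c.toNat).testBit i = (c.toNat == i) := by
      rw [Nat.shiftLeft_eq, one_mul, Nat.testBit_two_pow]
      by_cases h : c.toNat = i <;> simp [h]
    rw [this]
    cases m.testBit i <;> cases hb : (c.toNat == i) <;> simp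
 
-- character codes are injective
lemma char_toNat_inj {c d : Char} (h : c.toNat = d.toNat) : c = d := by
  apply Char.ext
  exact (UInt32.toNat_inj).mp h

-- mask containment ↔ bitwise implication
lemma or_eq_left_iff (a b : Nat) :
    ((a ||| b == a) = true) ↔ (∀ i, b.testBit i = true → a.testBit i = true) := by
  constructor
  · intro h i hb
    have h' : a ||| b = a := by simpa using h
    have := congrArg (Nat.testBit · i) h'
    simp only [Nat.testBit_or] at this
    rw [hb] at this
    cases ha : a.testBit i
    · rw [ha] at this; simp at this
    · rfl
  · intro h
    have : a ||| b = a := by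
      apply Nat.eq_of_testBit_eq
      intro i
      rw [Nat.testBit_or]
      cases hb : b.testBit i
      · simp
      · simp [h i hb]
    simpa using this

-- ===== VERDICT (by name: the statement is the Claim_ definition above) =====
theorem is_perm_hash_spec : Claim_equal_is_perm_hash := by
  intro s1 s2 _
  unfold Spec_is_perm_hash is_perm_hash is_perm_hash_alt
  rw [isPermLoop2_eq_all]
  apply Bool.eq_iff_iff.mpr
  rw [or_eq_left_iff]
  simp only [List.all_eq_true, contains_foldl_checker, testBit_maskFold, Nat.zero_testBit,
    Bool.false_or, List.any_eq_true, beq_iff_eq]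
  constructor
  · intro h i ⟨c, hc, hci⟩
    have := h c hc
    simp only [PySem.Dict.empty, PySem.Dict.contains, List.any_nil, Bool.false_or,
      List.contains_iff_mem] at this
    exact ⟨c, this, hci⟩
  · intro h c hc
    obtain ⟨d, hd, hdc⟩ := h c.toNat ⟨c, hc, rfl⟩
    have : d = c := char_toNat_inj hdc
    subst this
    simp [PySem.Dict.empty, hd]
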